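-- pv_equiv track=rewrite | github.com/tianyu1997/box_aabb | cpp/v4/viz/growth_viz.py | _shortcut_seq
-- ===== SOURCE A (Python) =====
-- from typing import Dict, List, Optional, Sequence, Tuple, Union
--
-- def _shortcut_seq(seq: List[int], adj: Dict[int, List[int]]) -> List[int]:
--     if len(seq) <= 2:
--         return seq
--     adj_set = {key: set(values) for key, values in adj.items()}
--     result = [seq[0]]
--     i = 0
--     while i < len(seq) - 1:
--         farthest = i + 1
--         for j in range(len(seq) - 1, i + 1, -1):
--             if seq[j] in adj_set.get(seq[i], set()):
--                 farthest = j
--                 break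
--         result.append(seq[farthest])
--         i = farthest
--     return result
-- ===== SOURCE B (Python) =====
-- from typing import Dict, List
--
--
-- def _shortcut_seq(seq: List[int], adj: Dict[int, List[int]]) -> List[int]:
--     if len(seq) <= 2:
--         return seq
--     # inverted index: value -> ascending list of positions in seq
--     pos = {}
--     for idx, v in enumerate(seq):
--         pos.setdefault(v, []).append(idx)
--     n = len(seq)
--     result = [seq[0]]
--     i = 0
--     while i < n - 1:
--         best = i + 1
--         for v in adj.get(seq[i], []):
--             p = pos.get(v, [])
--             if p and best < p[-1]:
--                 best = p[-1]
--         result.append(seq[best])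
--         i = best
--     return result
-- ===== Notes on version B (the rewrite author's own statement) =====
-- stated objective: faster
-- what changed: Instead of scanning sequence positions backward from the end at every step, B builds a value-to-sorted-positions inverted index once and, per step, takes the maximum over the last positions of the current value's neighbours.
import Mathlib
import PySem

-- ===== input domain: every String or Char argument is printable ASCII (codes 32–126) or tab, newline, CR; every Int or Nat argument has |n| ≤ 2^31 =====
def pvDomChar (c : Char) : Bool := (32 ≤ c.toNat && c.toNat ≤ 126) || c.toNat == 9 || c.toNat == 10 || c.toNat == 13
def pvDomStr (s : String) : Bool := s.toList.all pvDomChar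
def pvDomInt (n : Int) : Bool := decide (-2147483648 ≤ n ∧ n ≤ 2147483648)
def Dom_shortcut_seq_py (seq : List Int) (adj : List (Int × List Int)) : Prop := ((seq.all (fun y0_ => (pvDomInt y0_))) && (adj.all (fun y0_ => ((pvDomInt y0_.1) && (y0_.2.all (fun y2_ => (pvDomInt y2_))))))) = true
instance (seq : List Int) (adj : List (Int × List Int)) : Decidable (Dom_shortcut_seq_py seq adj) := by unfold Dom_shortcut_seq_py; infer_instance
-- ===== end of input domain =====

-- B replaces A's per-step backward scan over all sequence positions by a value→positions
-- inverted index built once and consulted per neighbour value (objective: faster).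

-- ===== PORT A =====
-- adj_set = {key: set(values) for key, values in adj.items()}  (a dict's items have
-- distinct keys, so the comprehension is exactly a map over the association list)
def pvAdjSet (adj : List (Int × List Int)) : List (Int × PySem.Set Int) :=
  adj.map (fun kv => (kv.1, PySem.Set.ofList kv.2))

-- the inner 'for j in range(len(seq)-1, i+1, -1): … break' (first match = find?), else i+1
def pvStepA (seq : List Int) (adjset : List (Int × PySem.Set Int)) (i : Int) : Int :=
  match (PySem.List.pyRange ((seq.length : Int) - 1) (i + 1) (-1)).find?
      (fun j => ((adjset.lookup (PySem.List.pyGetD seq i 0)).getD PySem.Set.empty).contains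
        (PySem.List.pyGetD seq j 0)) with
  | some j => j
  | none => i + 1

-- the while loop; fuel = len(seq) suffices since i strictly increases each iteration
-- (indices produced by the loop are always in range, so the pyGetD default 0 is never read)
def pvLoopA (seq : List Int) (adjset : List (Int × PySem.Set Int)) :
    Nat → Int → List Int → List Int
  | 0, _, res => res
  | fuel + 1, i, res =>
    if i < (seq.length : Int) - 1 then
      let farthest := pvStepA seq adjset i
      pvLoopA seq adjset fuel farthest (res ++ [PySem.List.pyGetD seq farthest 0])
    else res

def shortcut_seq_py (seq : List Int) (adj : List (Int × List Int)) : List Int :=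
  if seq.length ≤ 2 then seq
  else pvLoopA seq (pvAdjSet adj) seq.length 0 [PySem.List.pyGetD seq 0 0]

-- ===== PORT B =====
-- pos: value -> ascending list of its positions; pos.setdefault(v, []).append(idx)
-- sets pos[v] = pos.get(v, []) + [idx], which is Dict.modify
def pvBuildPos (seq : List Int) : PySem.Dict Int (List Int) :=
  (PySem.List.enumerate seq).foldl
    (fun d iv => d.modify iv.2 [] (fun l => l ++ [iv.1])) PySem.Dict.empty

-- best = i+1; for v in adj.get(seq[i], []): p = pos.get(v, []); if p and best < p[-1]: best = p[-1]
def pvStepB (seq : List Int) (adj : List (Int × List Int)) (pos : PySem.Dict Int (List Int))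
    (i : Int) : Int :=
  ((adj.lookup (PySem.List.pyGetD seq i 0)).getD []).foldl
    (fun best v =>
      let p := pos.getD v []
      if ¬ p.isEmpty ∧ best < PySem.List.pyGetD p (-1) 0 then PySem.List.pyGetD p (-1) 0
      else best)
    (i + 1)

def pvLoopB (seq : List Int) (adj : List (Int × List Int)) (pos : PySem.Dict Int (List Int)) :
    Nat → Int → List Int → List Int
  | 0, _, res => res
  | fuel + 1, i, res =>
    if i < (seq.length : Int) - 1 then
      let best := pvStepB seq adj pos i
      pvLoopB seq adj pos fuel best (res ++ [PySem.List.pyGetD seq best 0])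
    else res

def shortcut_seq_py_alt (seq : List Int) (adj : List (Int × List Int)) : List Int :=
  if seq.length ≤ 2 then seq
  else pvLoopB seq adj (pvBuildPos seq) seq.length 0 [PySem.List.pyGetD seq 0 0]

-- ===== PRECONDITION & SPEC =====
def Spec_shortcut_seq_py (seq : List Int) (adj : List (Int × List Int)) (out : List Int) : Prop := out = shortcut_seq_py_alt seq adj
instance (seq : List Int) (adj : List (Int × List Int)) (out : List Int) : Decidable (Spec_shortcut_seq_py seq adj out) := by unfold Spec_shortcut_seq_py; infer_instance

-- ===== CLAIM (what is proved, stated in full; the proofs are below) =====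
def Claim_equal_shortcut_seq_py : Prop := ∀ (seq : List Int) (adj : List (Int × List Int)), Dom_shortcut_seq_py seq adj → Spec_shortcut_seq_py seq adj (shortcut_seq_py seq adj)

-- ===== LEMMAS AND PROOFS =====

-- positions of value v among seq enumerated from s (what pvBuildPos stores under v)
def pvOccAux (xs : List Int) (s : Int) (v : Int) : List Int :=
  ((PySem.List.enumerate xs s).filter (fun iv => iv.2 == v)).map (·.1)

theorem pvOccAux_cons (x : Int) (xs : List Int) (s v : Int) :
    pvOccAux (x :: xs) s v =
      (if x == v then [s] else []) ++ pvOccAux xs (s + 1) v := by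
  simp only [pvOccAux, PySem.List.enumerate_cons, List.filter_cons]
  by_cases h : x = v <;> simp [h]

theorem mem_pvOccAux (xs : List Int) (s v j : Int) :
    j ∈ pvOccAux xs s v ↔ ∃ k : Nat, k < xs.length ∧ j = s + (k : Int) ∧ xs.getD k 0 = v := by
  induction xs generalizing s with
  | nil => simp [pvOccAux, PySem.List.enumerate_nil]
  | cons x xs ih =>
    rw [pvOccAux_cons]
    simp only [List.mem_append, ih]
    constructor
    · rintro (hj | ⟨k, hk, rfl, hv⟩)
      · refine ⟨0, by simp, ?_, ?_⟩
        · by_cases h : x = v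
          · simp [h] at hj; omega
          · simp [h] at hj
        · by_cases h : x = v
          · simp [h]
          · simp [h] at hj
      · exact ⟨k + 1, by simpa using hk, by push_cast; ring, by simpa using hv⟩
    · rintro ⟨k, hk, rfl, hv⟩
      cases k with
      | zero => left; simp at hv; simp [hv]
      | succ k =>
        right
        exact ⟨k, by simpa using hk, by push_cast; ring, by simpa using hv⟩

theorem mem_pvOccAux_lb (xs : List Int) (s v j : Int) (h : j ∈ pvOccAux xs s v) : s ≤ j := by
  rw [mem_pvOccAux] at h
  obtain ⟨k, _, rfl, _⟩ := h
  omega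

theorem pairwise_pvOccAux (xs : List Int) (s v : Int) :
    (pvOccAux xs s v).Pairwise (· < ·) := by
  induction xs generalizing s with
  | nil => simp [pvOccAux, PySem.List.enumerate_nil]
  | cons x xs ih =>
    rw [pvOccAux_cons]
    by_cases h : x = v <;> simp [h]
    · exact ⟨fun j hj => by have := mem_pvOccAux_lb xs (s+1) v j hj; omega, ih (s+1)⟩
    · exact ih (s + 1)

-- membership in the index list = an in-range position holding v
theorem mem_pvOcc_iff (seq : List Int) (v j : Int) :
    j ∈ pvOccAux seq 0 v ↔
      0 ≤ j ∧ j < (seq.length : Int) ∧ PySem.List.pyGetD seq j 0 = v := by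
  rw [mem_pvOccAux]
  constructor
  · rintro ⟨k, hk, rfl, hv⟩
    refine ⟨by omega, by simpa using (by exact_mod_cast hk : (k : Int) < (seq.length : Int)), ?_⟩
    simpa [PySem.List.pyGetD_natCast, hv] using hv
  · rintro ⟨hj0, hjn, hv⟩
    refine ⟨j.toNat, by omega, by omega, ?_⟩
    rw [← PySem.List.pyGetD_natCast seq j.toNat 0]
    simpa [Int.toNat_of_nonneg hj0] using hv

theorem buildPos_getD_aux (xs : List Int) :
    ∀ (s : Int) (d : PySem.Dict Int (List Int)) (v : Int),
      ((PySem.List.enumerate xs s).foldl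
        (fun d iv => d.modify iv.2 [] (fun l => l ++ [iv.1])) d).getD v []
      = d.getD v [] ++ pvOccAux xs s v := by
  induction xs with
  | nil => intro s d v; simp [pvOccAux, PySem.List.enumerate_nil]
  | cons x xs ih =>
    intro s d v
    rw [PySem.List.enumerate_cons, pvOccAux_cons]
    simp only [List.foldl_cons, ih]
    rw [PySem.Dict.modify, PySem.Dict.getD_insert]
    by_cases h : v = x
    · simp [h]
    · simp [h, Ne.symm h]

theorem buildPos_getD (seq : List Int) (v : Int) :
    (pvBuildPos seq).getD v [] = pvOccAux seq 0 v := by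
  rw [pvBuildPos, buildPos_getD_aux]
  simp [PySem.Dict.getD, PySem.Dict.empty, PySem.Dict.get?]

-- find? over a countdown range: a found element is the greatest one satisfying p
theorem find?_countdown_some (p : Int → Bool) (b : Int) :
    ∀ (n : Nat) (a : Int), a ≤ b + (n : Int) →
      ∀ j, (PySem.List.pyRange a b (-1)).find? p = some j →
        b < j ∧ j ≤ a ∧ p j = true ∧ ∀ x, j < x → x ≤ a → p x = false := by
  intro n
  induction n with
  | zero =>
    intro a ha j hj
    rw [PySem.List.pyRange_neg_one_eq_nil (by omega)] at hj
    simp at hj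
  | succ n ih =>
    intro a ha j hj
    by_cases hba : a ≤ b
    · rw [PySem.List.pyRange_neg_one_eq_nil hba] at hj; simp at hj
    · rw [PySem.List.pyRange_neg_one_cons (by omega)] at hj
      rw [List.find?_cons] at hj
      by_cases hpa : p a = true
      · simp [hpa] at hj
        subst hj
        exact ⟨by omega, by omega, hpa, fun x h1 h2 => by omega⟩
      · simp [hpa] at hj
        obtain ⟨h1, h2, h3, h4⟩ := ih (a - 1) (by omega) j hj
        refine ⟨h1, by omega, h3, fun x hx1 hx2 => ?_⟩
        by_cases hxa : x = a
        · subst hxa; simpa using hpa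
        · exact h4 x hx1 (by omega)

theorem find?_countdown_none (p : Int → Bool) (b a : Int)
    (hj : (PySem.List.pyRange a b (-1)).find? p = none) :
    ∀ x, b < x → x ≤ a → p x = false := by
  intro x h1 h2
  rw [List.find?_eq_none] at hj
  simpa using hj x (by rw [PySem.List.mem_pyRange_neg_one]; omega)

theorem lookup_pvAdjSet (adj : List (Int × List Int)) (k : Int) :
    (pvAdjSet adj).lookup k = (adj.lookup k).map PySem.Set.ofList := by
  induction adj with
  | nil => simp [pvAdjSet]
  | cons kv adj ih =>
    simp only [pvAdjSet, List.map_cons, List.lookup_cons] at *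
    by_cases h : k == kv.1 <;> simp [List.lookup, h, ih]

-- A's membership test is membership in the raw adjacency list
theorem contains_adjset_iff (adj : List (Int × List Int)) (k x : Int) :
    (((pvAdjSet adj).lookup k).getD PySem.Set.empty).contains x = true ↔
      x ∈ (adj.lookup k).getD [] := by
  rw [lookup_pvAdjSet]
  cases h : adj.lookup k with
  | none => simp [PySem.Set.empty]
  | some L => simp [PySem.Set.mem_ofList]

-- B's fold: lower bound, origin of the result, and upper bound over the candidates
theorem stepB_fold_facts (pos : PySem.Dict Int (List Int)) (L : List Int) (b : Int) :
    b ≤ L.foldl (fun best v =>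
        let p := pos.getD v []
        if ¬ p.isEmpty ∧ best < PySem.List.pyGetD p (-1) 0 then PySem.List.pyGetD p (-1) 0
        else best) b ∧
    (L.foldl (fun best v =>
        let p := pos.getD v []
        if ¬ p.isEmpty ∧ best < PySem.List.pyGetD p (-1) 0 then PySem.List.pyGetD p (-1) 0
        else best) b = b ∨
      ∃ v ∈ L, (pos.getD v []) ≠ [] ∧
        L.foldl (fun best v =>
          let p := pos.getD v []
          if ¬ p.isEmpty ∧ best < PySem.List.pyGetD p (-1) 0 then PySem.List.pyGetD p (-1) 0
          else best) b = PySem.List.pyGetD (pos.getD v []) (-1) 0) ∧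
    (∀ v ∈ L, (pos.getD v []) ≠ [] →
      PySem.List.pyGetD (pos.getD v []) (-1) 0 ≤ L.foldl (fun best v =>
        let p := pos.getD v []
        if ¬ p.isEmpty ∧ best < PySem.List.pyGetD p (-1) 0 then PySem.List.pyGetD p (-1) 0
        else best) b) := by
  set f := fun (best : Int) (v : Int) =>
      let p := pos.getD v []
      if ¬ p.isEmpty ∧ best < PySem.List.pyGetD p (-1) 0 then PySem.List.pyGetD p (-1) 0
      else best with hf
  induction L generalizing b with
  | nil => simp
  | cons w L ih =>
    obtain ⟨ih1, ih2, ih3⟩ := ih (f b w)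
    have hfb : b ≤ f b w := by
      simp only [hf]
      split_ifs with h
      · exact le_of_lt h.2
      · exact le_refl b
    have hstep : f b w = b ∨ ((pos.getD w []) ≠ [] ∧
        f b w = PySem.List.pyGetD (pos.getD w []) (-1) 0) := by
      simp only [hf]
      split_ifs with h
      · right; exact ⟨fun he => by simp [he] at h, rfl⟩
      · left; rfl
    refine ⟨le_trans hfb ih1, ?_, ?_⟩
    · rcases ih2 with h2 | ⟨v, hv, hne, heq⟩
      · rcases hstep with h | ⟨hne, heq⟩
        · left; rw [List.foldl_cons, h2, h]
        · right; exact ⟨w, by simp, hne, by rw [List.foldl_cons, h2, heq]⟩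
      · right; exact ⟨v, by simp [hv], hne, by rw [List.foldl_cons, heq]⟩
    · intro v hv hne
      rcases List.mem_cons.1 hv with rfl | hv'
      · have hcand : PySem.List.pyGetD (pos.getD v []) (-1) 0 ≤ f b v := by
          simp only [hf]
          split_ifs with h
          · exact le_refl _
          · exact not_lt.1 (fun hlt => h ⟨by simpa using hne, hlt⟩)
        calc PySem.List.pyGetD (pos.getD v []) (-1) 0 ≤ f b v := hcand
          _ ≤ List.foldl f (f b v) L := ih1
          _ = List.foldl f b (v :: L) := by rw [List.foldl_cons]
      · rw [List.foldl_cons]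
        exact ih3 v hv' hne

-- sorted list: every element is at most the last
theorem le_getLast_of_pairwise_lt (l : List Int) (h : l.Pairwise (· < ·)) (x : Int)
    (hx : x ∈ l) (hne : l ≠ []) : x ≤ l.getLast hne := by
  induction l with
  | nil => simp at hx
  | cons a l ih =>
    rcases List.pairwise_cons.1 h with ⟨ha, hl⟩
    cases l with
    | nil => simp at hx; simp [hx]
    | cons b l' =>
      rw [List.getLast_cons (by simp)]
      rcases List.mem_cons.1 hx with rfl | hx'
      · have hb := List.getLast_mem (l := b :: l') (by simp)
        have := ha _ hb
        omega
      · exact ih hl hx' (by simp)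

theorem stepB_lb (seq : List Int) (adj : List (Int × List Int)) (i : Int) :
    i + 1 ≤ pvStepB seq adj (pvBuildPos seq) i :=
  (stepB_fold_facts (pvBuildPos seq)
    ((adj.lookup (PySem.List.pyGetD seq i 0)).getD []) (i + 1)).1

theorem step_eq (seq : List Int) (adj : List (Int × List Int)) (i : Int)
    (h0 : 0 ≤ i) (_hi : i < (seq.length : Int) - 1) :
    pvStepA seq (pvAdjSet adj) i = pvStepB seq adj (pvBuildPos seq) i := by
  obtain ⟨F1, F2, F3⟩ := stepB_fold_facts (pvBuildPos seq)
    ((adj.lookup (PySem.List.pyGetD seq i 0)).getD []) (i + 1)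
  set L := (adj.lookup (PySem.List.pyGetD seq i 0)).getD [] with hL
  set B := pvStepB seq adj (pvBuildPos seq) i with hBdef
  have hBfold : B = L.foldl (fun best v =>
      let p := (pvBuildPos seq).getD v []
      if ¬ p.isEmpty ∧ best < PySem.List.pyGetD p (-1) 0 then PySem.List.pyGetD p (-1) 0
      else best) (i + 1) := rfl
  rw [← hBfold] at F1 F2 F3
  -- facts about any candidate B produces / any in-range position carrying a neighbour value
  have cand_mem : ∀ v, (pvBuildPos seq).getD v [] ≠ [] →
      PySem.List.pyGetD ((pvBuildPos seq).getD v []) (-1) 0 ∈ pvOccAux seq 0 v := by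
    intro v hne
    have hocc : (pvBuildPos seq).getD v [] = pvOccAux seq 0 v := buildPos_getD seq v
    rw [hocc]
    have hne' : pvOccAux seq 0 v ≠ [] := hocc ▸ hne
    rw [PySem.List.pyGetD_neg_one _ _ hne']
    exact List.getLast_mem hne'
  have pos_le_cand : ∀ v j, j ∈ pvOccAux seq 0 v → (pvBuildPos seq).getD v [] ≠ [] →
      j ≤ PySem.List.pyGetD ((pvBuildPos seq).getD v []) (-1) 0 := by
    intro v j hj hne
    have hocc : (pvBuildPos seq).getD v [] = pvOccAux seq 0 v := buildPos_getD seq v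
    rw [hocc]
    have hne' : pvOccAux seq 0 v ≠ [] := hocc ▸ hne
    rw [PySem.List.pyGetD_neg_one _ _ hne']
    exact le_getLast_of_pairwise_lt _ (pairwise_pvOccAux seq 0 v) j hj hne'
  unfold pvStepA
  have hcast : ((seq.length : Int) - 1) ≤ (i + 1) + (seq.length : Int) := by omega
  cases hf : (PySem.List.pyRange ((seq.length : Int) - 1) (i + 1) (-1)).find?
      (fun j => (((pvAdjSet adj).lookup (PySem.List.pyGetD seq i 0)).getD
        PySem.Set.empty).contains (PySem.List.pyGetD seq j 0)) with
  | some j =>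
    show j = B
    obtain ⟨h1, h2, h3, h4⟩ := find?_countdown_some _ (i + 1) seq.length _ hcast j hf
    -- j is a valid candidate of B
    have hjv : PySem.List.pyGetD seq j 0 ∈ L := by
      rw [hL]
      exact (contains_adjset_iff adj (PySem.List.pyGetD seq i 0) _).1 h3
    have hjocc : j ∈ pvOccAux seq 0 (PySem.List.pyGetD seq j 0) :=
      (mem_pvOcc_iff seq _ j).2 ⟨by omega, by omega, rfl⟩
    have hne : (pvBuildPos seq).getD (PySem.List.pyGetD seq j 0) [] ≠ [] := by
      rw [buildPos_getD]
      exact List.ne_nil_of_mem hjocc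
    have hjB : j ≤ B :=
      le_trans (pos_le_cand _ j hjocc hne) (F3 _ hjv hne)
    -- B is at most j
    have hBj : B ≤ j := by
      rcases F2 with h | ⟨v, hvL, hvne, heq⟩
      · omega
      · have hmem := cand_mem v hvne
        rw [← heq] at hmem
        obtain ⟨hB0, hBn, hBv⟩ := (mem_pvOcc_iff seq v B).1 hmem
        by_contra hgt
        have hff := h4 B (by omega) (by omega)
        have htt := (contains_adjset_iff adj (PySem.List.pyGetD seq i 0)
          (PySem.List.pyGetD seq B 0)).2 (by rw [hBv]; rw [hL] at hvL; exact hvL)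
        rw [hff] at htt
        exact Bool.false_ne_true htt
    omega
  | none =>
    show i + 1 = B
    have h4 := find?_countdown_none _ (i + 1) _ hf
    rcases F2 with h | ⟨v, hvL, hvne, heq⟩
    · omega
    · have hmem := cand_mem v hvne
      rw [← heq] at hmem
      obtain ⟨hB0, hBn, hBv⟩ := (mem_pvOcc_iff seq v B).1 hmem
      by_cases hle : B ≤ i + 1
      · omega
      · exfalso
        have hff := h4 B (by omega) (by omega)
        have htt := (contains_adjset_iff adj (PySem.List.pyGetD seq i 0)
          (PySem.List.pyGetD seq B 0)).2 (by rw [hBv]; rw [hL] at hvL; exact hvL)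
        rw [hff] at htt
        exact Bool.false_ne_true htt

theorem loops_eq (seq : List Int) (adj : List (Int × List Int)) :
    ∀ (fuel : Nat) (i : Int) (res : List Int), 0 ≤ i →
      pvLoopA seq (pvAdjSet adj) fuel i res = pvLoopB seq adj (pvBuildPos seq) fuel i res := by
  intro fuel
  induction fuel with
  | zero => intro i res _; rfl
  | succ fuel ih =>
    intro i res h0
    simp only [pvLoopA, pvLoopB]
    by_cases h : i < (seq.length : Int) - 1
    · simp only [h, if_pos]
      rw [step_eq seq adj i h0 h]
      exact ih _ _ (by have := stepB_lb seq adj i; omega)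
    · simp [h]

-- ===== VERDICT (by name: the statement is the Claim_ definition above) =====
theorem shortcut_seq_py_spec : Claim_equal_shortcut_seq_py := by
  intro seq adj _
  unfold Spec_shortcut_seq_py shortcut_seq_py shortcut_seq_py_alt
  by_cases h : seq.length ≤ 2
  · simp [h]
  · simp [h, loops_eq seq adj seq.length 0 _ (by omega)]
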